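-- pv_equiv track=rewrite | github.com/thealper2/codewars-solutions | 7-kyu/building_a_wall_with_bricks.py | calculate_bricks_count
-- ===== SOURCE A (Python) =====
-- def calculate_bricks_count(width, height):
--     brick_counts = [0, 0, 0]
--     rows = height // 5
--
--     for i in range(rows):
--         if (i + 1) % 3 != 1:
--             brick_counts[2] += 1
--             brick_counts[1] += 1
--             brick_counts[0] += width // 60 - 1
--         else:
--             brick_counts[0] += width // 60
--
--     result = []
--     if brick_counts[0] > 0:
--         result.append(f"{brick_counts[0]}L")
--     if brick_counts[1] > 0:
--         result.append(f"{brick_counts[1]}M")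
--     if brick_counts[2] > 0:
--         result.append(f"{brick_counts[2]}S")
--
--     return ''.join(result)
-- ===== SOURCE B (Python) =====
-- def calculate_bricks_count(width, height):
--     rows = max(height // 5, 0)
--     full = (rows + 2) // 3          # rows with index i % 3 == 0
--     other = rows - full             # the remaining rows
--     w = width // 60
--     large = full * w + other * (w - 1)
--     parts = []
--     if large > 0:
--         parts.append(f"{large}L")
--     if other > 0:
--         parts.append(f"{other}M")
--     if other > 0:
--         parts.append(f"{other}S")
--     return ''.join(parts)
-- ===== Notes on version B (the rewrite author's own statement) =====
-- stated objective: faster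
-- what changed: Replaces the per-row loop over height//5 rows with closed-form arithmetic: the number of 'full' rows (i % 3 == 0) is (rows+2)//3, from which all three brick counts follow directly.
import Mathlib
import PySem

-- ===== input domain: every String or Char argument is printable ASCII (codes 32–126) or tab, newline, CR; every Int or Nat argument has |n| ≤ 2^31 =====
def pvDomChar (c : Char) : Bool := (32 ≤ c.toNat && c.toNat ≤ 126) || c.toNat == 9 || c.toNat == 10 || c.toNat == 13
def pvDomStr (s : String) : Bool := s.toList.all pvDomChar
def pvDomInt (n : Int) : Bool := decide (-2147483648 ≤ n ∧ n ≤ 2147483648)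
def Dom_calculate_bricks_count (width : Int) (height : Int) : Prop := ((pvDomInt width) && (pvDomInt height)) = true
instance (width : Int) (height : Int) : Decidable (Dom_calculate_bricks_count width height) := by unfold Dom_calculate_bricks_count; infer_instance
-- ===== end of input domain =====

-- B replaces A's O(height) per-row loop by closed-form O(1) arithmetic counting rows by residue.

-- ===== PORT A =====
-- loop body of A: state is (brick_counts[0], brick_counts[1], brick_counts[2])
def pvStepA (width : Int) (c : Int × Int × Int) (i : Int) : Int × Int × Int :=
  if PySem.Int.mod (i + 1) 3 ≠ 1 then
    (c.1 + (PySem.Int.floordiv width 60 - 1), c.2.1 + 1, c.2.2 + 1)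
  else
    (c.1 + PySem.Int.floordiv width 60, c.2.1, c.2.2)

def calculate_bricks_count (width : Int) (height : Int) : String :=
  let rows := PySem.Int.floordiv height 5
  let counts := (PySem.List.pyRange 0 rows 1).foldl (pvStepA width) (0, 0, 0)
  let result : List String := []
  let result := if counts.1 > 0 then result ++ [PySem.Int.toStr counts.1 ++ "L"] else result
  let result := if counts.2.1 > 0 then result ++ [PySem.Int.toStr counts.2.1 ++ "M"] else result
  let result := if counts.2.2 > 0 then result ++ [PySem.Int.toStr counts.2.2 ++ "S"] else result
  PySem.Str.join "" result

-- ===== PORT B =====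
def calculate_bricks_count_alt (width : Int) (height : Int) : String :=
  let rows := max (PySem.Int.floordiv height 5) 0
  let full := PySem.Int.floordiv (rows + 2) 3
  let other := rows - full
  let w := PySem.Int.floordiv width 60
  let large := full * w + other * (w - 1)
  let parts : List String := []
  let parts := if large > 0 then parts ++ [PySem.Int.toStr large ++ "L"] else parts
  let parts := if other > 0 then parts ++ [PySem.Int.toStr other ++ "M"] else parts
  let parts := if other > 0 then parts ++ [PySem.Int.toStr other ++ "S"] else parts
  PySem.Str.join "" parts

-- ===== PRECONDITION & SPEC =====
def Spec_calculate_bricks_count (width : Int) (height : Int) (out : String) : Prop := out = calculate_bricks_count_alt width height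
instance (width : Int) (height : Int) (out : String) : Decidable (Spec_calculate_bricks_count width height out) := by unfold Spec_calculate_bricks_count; infer_instance

-- ===== CLAIM (what is proved, stated in full; the proofs are below) =====
def Claim_equal_calculate_bricks_count : Prop := ∀ (width : Int) (height : Int), Dom_calculate_bricks_count width height → Spec_calculate_bricks_count width height (calculate_bricks_count width height)

-- ===== LEMMAS AND PROOFS =====

-- closed form of A's loop: after n rows the counts are determined by f = number of full rows = (n+2)/3
lemma pv_loop_closed (w : Int) (n : Nat) :
    (PySem.List.pyRange 0 (n : Int) 1).foldl (pvStepA w) (0, 0, 0)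
      = (((n : Int) + 2) / 3 * PySem.Int.floordiv w 60
           + ((n : Int) - ((n : Int) + 2) / 3) * (PySem.Int.floordiv w 60 - 1),
         (n : Int) - ((n : Int) + 2) / 3,
         (n : Int) - ((n : Int) + 2) / 3) := by
  induction n with
  | zero => simp [pysem]
  | succ m ih =>
    have h : PySem.List.pyRange 0 ((m : Int) + 1) 1
        = PySem.List.pyRange 0 (m : Int) 1 ++ [(m : Int)] :=
      PySem.List.pyRange_one_succ_right (Int.natCast_nonneg m)
    push_cast
    rw [h, List.foldl_append, ih]
    simp only [List.foldl, pvStepA, PySem.Int.mod_eq_emod_of_pos (by norm_num : (0:Int) < 3)]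
    by_cases h0 : (m : Int) % 3 = 0
    · have hcond : ¬ ((m : Int) + 1) % 3 ≠ 1 := by omega
      have hf : ((m : Int) + 1 + 2) / 3 = ((m : Int) + 2) / 3 + 1 := by omega
      rw [if_neg hcond, hf]
      simp only [Prod.mk.injEq]
      refine ⟨by ring, by ring, by ring⟩
    · have hcond : ((m : Int) + 1) % 3 ≠ 1 := by omega
      have hf : ((m : Int) + 1 + 2) / 3 = ((m : Int) + 2) / 3 := by omega
      rw [if_pos hcond, hf]
      simp only [Prod.mk.injEq]
      refine ⟨by ring, by ring, by ring⟩

-- ===== VERDICT (by name: the statement is the Claim_ definition above) =====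
theorem calculate_bricks_count_spec : Claim_equal_calculate_bricks_count := by
  intro width height _
  unfold Spec_calculate_bricks_count
  simp only [calculate_bricks_count, calculate_bricks_count_alt,
    PySem.Int.floordiv_eq_ediv_of_pos (by norm_num : (0:Int) < 5)]
  by_cases hr : 0 ≤ height / 5
  · have hmax : max (height / 5) 0 = height / 5 := by omega
    have hn : height / 5 = (((height / 5).toNat : Nat) : Int) := by omega
    rw [hmax, hn, pv_loop_closed,
        PySem.Int.floordiv_eq_ediv_of_pos (by norm_num : (0:Int) < 3)]
  · have hempty : PySem.List.pyRange 0 (height / 5) 1 = [] := by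
      simp [PySem.List.pyRange]; omega
    have hmax : max (height / 5) 0 = 0 := by omega
    rw [hempty, hmax]
    norm_num [PySem.Int.floordiv_eq_ediv_of_pos (by norm_num : (0:Int) < 3)]
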